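-- pv_equiv track=rewrite | github.com/theredbluepill/arc-interactive | environment_files/pk01/v1/pk01.py | _straight_tromino
-- ===== SOURCE A (Python) =====
-- def _straight_tromino(cells: list[tuple[int, int]]) -> bool:
--     if len(cells) != 3:
--         return False
--     xs = [c[0] for c in cells]
--     ys = [c[1] for c in cells]
--     if len(set(xs)) == 1:
--         ys_sorted = sorted(ys)
--         return ys_sorted[1] - ys_sorted[0] == 1 and ys_sorted[2] - ys_sorted[1] == 1
--     if len(set(ys)) == 1:
--         xs_sorted = sorted(xs)
--         return xs_sorted[1] - xs_sorted[0] == 1 and xs_sorted[2] - xs_sorted[1] == 1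
--     return False
-- ===== SOURCE B (Python) =====
-- def _straight_tromino(cells: list[tuple[int, int]]) -> bool:
--     if len(cells) != 3:
--         return False
--     c0, c1, c2 = sorted(cells)
--     d1 = (c1[0] - c0[0], c1[1] - c0[1])
--     d2 = (c2[0] - c1[0], c2[1] - c1[1])
--     return d1 == d2 and d1 in ((0, 1), (1, 0))
-- ===== Notes on version B (the rewrite author's own statement) =====
-- stated objective: simpler
-- what changed: Instead of branching on which coordinate is constant and sorting the other axis, B sorts the three cells lexicographically once and accepts iff the two successive step vectors are equal and are (0,1) or (1,0).
import Mathlib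
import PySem

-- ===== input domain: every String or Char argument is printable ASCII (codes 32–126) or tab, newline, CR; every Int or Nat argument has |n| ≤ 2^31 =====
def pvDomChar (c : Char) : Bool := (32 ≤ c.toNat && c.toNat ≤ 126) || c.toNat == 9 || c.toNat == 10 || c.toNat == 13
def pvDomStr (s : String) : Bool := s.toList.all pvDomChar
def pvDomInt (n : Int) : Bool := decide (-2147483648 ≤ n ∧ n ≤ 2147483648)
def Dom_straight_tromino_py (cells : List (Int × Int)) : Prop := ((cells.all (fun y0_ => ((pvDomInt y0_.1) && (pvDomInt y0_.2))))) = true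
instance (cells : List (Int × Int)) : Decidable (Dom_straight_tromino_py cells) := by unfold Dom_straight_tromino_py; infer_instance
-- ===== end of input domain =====

-- B replaces A's branch-on-constant-axis check by one lexicographic sort of the cells and a uniform-step test (different decomposition, same cost).


-- ===== PORT A =====
-- 'ys_sorted[1]' etc. are ported with pyGetD (default 0): inside that branch the list has length 3, so the index is always in range and the default is never read — exact where Python returns.
def straight_tromino_py (cells : List (Int × Int)) : Bool :=
  if cells.length ≠ 3 then false
  else
    let xs := cells.map (·.1)
    let ys := cells.map (·.2)
    if (PySem.Set.ofList xs).length = 1 then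
      let ys_sorted := PySem.List.sorted ys (fun y => y) false
      (PySem.List.pyGetD ys_sorted 1 0 - PySem.List.pyGetD ys_sorted 0 0 == 1) &&
      (PySem.List.pyGetD ys_sorted 2 0 - PySem.List.pyGetD ys_sorted 1 0 == 1)
    else if (PySem.Set.ofList ys).length = 1 then
      let xs_sorted := PySem.List.sorted xs (fun x => x) false
      (PySem.List.pyGetD xs_sorted 1 0 - PySem.List.pyGetD xs_sorted 0 0 == 1) &&
      (PySem.List.pyGetD xs_sorted 2 0 - PySem.List.pyGetD xs_sorted 1 0 == 1)
    else false

-- ===== PORT B =====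
-- sorted(cells) on pairs is Python's lexicographic sort: PySem.List.sorted2 with the two components as keys; the unpacking 'c0, c1, c2 = sorted(cells)' is the match on the 3-element result.
def straight_tromino_py_alt (cells : List (Int × Int)) : Bool :=
  if cells.length ≠ 3 then false
  else
    match PySem.List.sorted2 cells (·.1) (·.2) false with
    | [c0, c1, c2] =>
        let d1 : Int × Int := (c1.1 - c0.1, c1.2 - c0.2)
        let d2 : Int × Int := (c2.1 - c1.1, c2.2 - c1.2)
        (d1 == d2) && (d1 == ((0 : Int), (1 : Int)) || d1 == ((1 : Int), (0 : Int)))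
    | _ => false

-- ===== PRECONDITION & SPEC =====
def Spec_straight_tromino_py (cells : List (Int × Int)) (out : Bool) : Prop := out = straight_tromino_py_alt cells
instance (cells : List (Int × Int)) (out : Bool) : Decidable (Spec_straight_tromino_py cells out) := by unfold Spec_straight_tromino_py; infer_instance

-- ===== CLAIM (what is proved, stated in full; the proofs are below) =====
def Claim_equal_straight_tromino_py : Prop := ∀ (cells : List (Int × Int)), Dom_straight_tromino_py cells → Spec_straight_tromino_py cells (straight_tromino_py cells)

-- ===== LEMMAS AND PROOFS =====

-- structural evaluation rules for PySem.List.insertBy (its brecOn body does not unfold by name)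
theorem insertBy_nil {α : Type} (p : α → α → Bool) (x : α) : PySem.List.insertBy p x [] = [x] := rfl

theorem insertBy_cons {α : Type} (p : α → α → Bool) (x y : α) (ys : List α) :
    PySem.List.insertBy p x (y :: ys) = if p x y then x :: y :: ys else y :: PySem.List.insertBy p x ys := rfl

-- len(set([x,y,z])) == 1 means all three are equal
theorem set3_len (x y z : Int) : ((PySem.Set.ofList [x,y,z]).length = 1) ↔ (y = x ∧ z = x) := by
  simp [PySem.Set.ofList, PySem.Set.add, PySem.Set.contains]
  split_ifs <;> simp_all

-- sorted of a three-element Int list, written out as a decision tree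
theorem sorted3 (x y z : Int) : PySem.List.sorted [x,y,z] (fun v => v) false =
    if y < x then (if z < y then [z,y,x] else if z < x then [y,z,x] else [y,x,z])
    else (if z < x then [z,x,y] else if z < y then [x,z,y] else [x,y,z]) := by
  simp only [PySem.List.sorted, List.foldl, insertBy_nil, insertBy_cons]
  split_ifs <;> simp_all [insertBy_nil, insertBy_cons] <;> split_ifs <;> simp_all <;> omega

-- lexicographic sorted of three pairs, written out as a decision tree
theorem sorted2_3 (ax ay bx by' cx cy : Int) :
    PySem.List.sorted2 [(ax,ay),(bx,by'),(cx,cy)] (·.1) (·.2) false =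
    if (bx < ax ∨ (¬ ax < bx ∧ by' < ay)) then
      (if (cx < bx ∨ (¬ bx < cx ∧ cy < by')) then [(cx,cy),(bx,by'),(ax,ay)]
       else if (cx < ax ∨ (¬ ax < cx ∧ cy < ay)) then [(bx,by'),(cx,cy),(ax,ay)]
       else [(bx,by'),(ax,ay),(cx,cy)])
    else
      (if (cx < ax ∨ (¬ ax < cx ∧ cy < ay)) then [(cx,cy),(ax,ay),(bx,by')]
       else if (cx < bx ∨ (¬ bx < cx ∧ cy < by')) then [(ax,ay),(cx,cy),(bx,by')]
       else [(ax,ay),(bx,by'),(cx,cy)]) := by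
  simp only [PySem.List.sorted2, List.foldl, insertBy_nil, insertBy_cons]
  split_ifs <;> simp_all [insertBy_nil, insertBy_cons, Prod.ext_iff] <;> (try (split_ifs <;> simp_all)) <;> omega

set_option maxHeartbeats 1000000 in
theorem straight_tromino_main (a b c : Int × Int) :
    straight_tromino_py [a, b, c] = straight_tromino_py_alt [a, b, c] := by
  obtain ⟨ax, ay⟩ := a; obtain ⟨bx, by'⟩ := b; obtain ⟨cx, cy⟩ := c
  simp only [straight_tromino_py, straight_tromino_py_alt, List.map, List.length_cons,
    List.length_nil]
  rw [sorted2_3]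
  norm_num [set3_len]
  rw [sorted3 ay by' cy, sorted3 ax bx cx]
  rw [Bool.eq_iff_iff]
  split_ifs <;>
    simp_all [PySem.List.pyGetD, PySem.List.pyGet?, PySem.List.pyIdx?, Prod.ext_iff] <;>
    omega

-- ===== VERDICT (by name: the statement is the Claim_ definition above) =====
theorem straight_tromino_py_spec : Claim_equal_straight_tromino_py := by
  intro cells _
  unfold Spec_straight_tromino_py
  match cells with
  | [] => rfl
  | [_] => rfl
  | [_, _] => rfl
  | [a, b, c] => exact straight_tromino_main a b c
  | _ :: _ :: _ :: _ :: _ => simp [straight_tromino_py, straight_tromino_py_alt]
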